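-- pv_equiv track=rewrite | github.com/domokane/FinancePy | scripts/run_pep8_converter.py | normalize_hashes_and_functions
-- ===== SOURCE A (Python) =====
-- def normalize_hashes_and_functions(source: str) -> str:
--     """
--     Normalize Python code:
--     - Remove existing hash lines
--     - Remove blank lines before function/class definitions
--     - Add a single blank line + 88 '#' + 2 blank lines before each function/class
--     - Ensure file ends with a single newline
--     """
--     lines = source.splitlines()
--     new_lines = []
--     i = 0
--     n = len(lines)
--
--     while i < n:
--         line = lines[i]
--         stripped = line.lstrip()
--
--         # Skip existing full-line hashes
--         if stripped.startswith("#") and set(stripped.strip()) == {"#"}: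
--             i += 1
--             continue
--
--         is_def_or_class = stripped.startswith(("def ", "class "))
--
--         if is_def_or_class:
--             # Remove preceding blank lines
--             while new_lines and new_lines[-1].strip() == "":
--                 new_lines.pop()
--
--             # Add one blank line, 88 '#'s, 2 blank lines
--             new_lines.append("")
--             new_lines.append("#" * 88)
--             new_lines.append("")
--             new_lines.append("")
--
--             # Add the def/class line
--             new_lines.append(line)
--             i += 1
--             continue
--
--         # Normal line
--         new_lines.append(line)
--         i += 1
--
--     # Ensure file ends with single newline
--     if not new_lines or new_lines[-1].strip() != "":
--         new_lines.append("")
--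
--     return "\n".join(new_lines)
-- ===== SOURCE B (Python) =====
-- def normalize_hashes_and_functions(source: str) -> str:
--     """One pass with a pending-blank-lines buffer instead of appending then popping."""
--     out = []
--     pending = []
--     for line in source.splitlines():
--         t = line.strip()
--         if t and not t.strip("#"):
--             # full-line hash: drop it
--             continue
--         if line.lstrip().startswith(("def ", "class ")):
--             pending = []
--             out.extend(["", "#" * 88, "", "", line])
--         elif not t:
--             pending.append(line)
--         else:
--             out.extend(pending)
--             pending = []
--             out.append(line)
--     out.extend(pending)
--     if not out or out[-1].strip() != "":
--         out.append("")
--     return "\n".join(out)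
-- ===== Notes on version B (the rewrite author's own statement) =====
-- stated objective: alternative
-- what changed: B replaces A's append-then-pop editing of the output list (blank lines are emitted and later popped off the tail when a def/class arrives) by a single pass that holds blank lines in a pending buffer, flushing it on a normal line and discarding it on a def/class line.
import Mathlib
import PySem

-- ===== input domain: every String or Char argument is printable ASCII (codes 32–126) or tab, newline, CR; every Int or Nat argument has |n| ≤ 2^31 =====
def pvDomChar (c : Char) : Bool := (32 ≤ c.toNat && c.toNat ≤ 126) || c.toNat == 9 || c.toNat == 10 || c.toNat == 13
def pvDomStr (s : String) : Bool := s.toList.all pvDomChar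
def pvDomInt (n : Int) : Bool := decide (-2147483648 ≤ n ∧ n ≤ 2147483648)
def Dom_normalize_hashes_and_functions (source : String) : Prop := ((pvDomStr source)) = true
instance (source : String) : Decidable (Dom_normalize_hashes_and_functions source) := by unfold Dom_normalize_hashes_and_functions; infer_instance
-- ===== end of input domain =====

-- B replaces A's append-then-pop output editing by a one-pass pending-blank-lines buffer (objective: alternative decomposition, same cost).

-- ===== PORT A =====

-- "x.strip() == ''" (used by A's pop loop and both final-newline checks)
def pvBlank (s : String) : Bool := (PySem.Str.strip s).toList.isEmpty

-- "#" * 88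
def pvHashes88 : String := String.ofList (PySem.List.pyRepeat ['#'] 88)

-- "while new_lines and new_lines[-1].strip() == '': new_lines.pop()"
def pvPopBlanks (nl : List String) : List String :=
  ((nl.reverse).dropWhile pvBlank).reverse

-- one iteration of A's while loop (i always advances by 1, so it is a fold over the lines)
def pvStepA (nl : List String) (line : String) : List String :=
  let stripped := PySem.Str.lstrip line
  if PySem.Str.startswith stripped "#" &&
      PySem.Set.equal (PySem.Set.ofList (PySem.Str.strip stripped).toList) (PySem.Set.ofList ['#']) then
    nl
  else if PySem.Str.startswith stripped "def " || PySem.Str.startswith stripped "class " then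
    pvPopBlanks nl ++ ["", pvHashes88, "", "", line]
  else
    nl ++ [line]

def normalize_hashes_and_functions (source : String) : String :=
  let lines := PySem.Str.splitlines source
  let new_lines := lines.foldl pvStepA []
  let new_lines :=
    match new_lines.getLast? with
    | none => new_lines ++ [""]
    | some last => if pvBlank last then new_lines else new_lines ++ [""]
  PySem.Str.join "\n" new_lines

-- ===== PORT B =====

-- one iteration of B's for loop over (out, pending)
def pvStepB (st : List String × List String) (line : String) : List String × List String :=
  let t := PySem.Str.strip line
  if !t.toList.isEmpty && (PySem.Str.stripChars t "#").toList.isEmpty then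
    st
  else if PySem.Str.startswith (PySem.Str.lstrip line) "def " ||
          PySem.Str.startswith (PySem.Str.lstrip line) "class " then
    (st.1 ++ ["", pvHashes88, "", "", line], [])
  else if t.toList.isEmpty then
    (st.1, st.2 ++ [line])
  else
    (st.1 ++ st.2 ++ [line], [])

def normalize_hashes_and_functions_alt (source : String) : String :=
  let st := (PySem.Str.splitlines source).foldl pvStepB ([], [])
  let out := st.1 ++ st.2
  let out :=
    match out.getLast? with
    | none => out ++ [""]
    | some last => if pvBlank last then out else out ++ [""]
  PySem.Str.join "\n" out

-- ===== PRECONDITION & SPEC =====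
def Spec_normalize_hashes_and_functions (source : String) (out : String) : Prop := out = normalize_hashes_and_functions_alt source
instance (source : String) (out : String) : Decidable (Spec_normalize_hashes_and_functions source out) := by unfold Spec_normalize_hashes_and_functions; infer_instance

-- ===== CLAIM (what is proved, stated in full; the proofs are below) =====
def Claim_equal_normalize_hashes_and_functions : Prop := ∀ (source : String), Dom_normalize_hashes_and_functions source → Spec_normalize_hashes_and_functions source (normalize_hashes_and_functions source)

-- ===== LEMMAS AND PROOFS =====

-- the loop invariant: pending holds only blank lines, out is empty or ends in a non-blank line
def pvInv (out pending : List String) : Prop :=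
  (∀ p ∈ pending, pvBlank p = true) ∧
  (out = [] ∨ ∃ h : out ≠ [], pvBlank (out.getLast h) = false)

lemma pvRstrip_eq_nil_iff (l : List Char) :
    PySem.Chars.rstrip l = [] ↔ ∀ c ∈ l, PySem.Chars.isspace c := by
  simp [PySem.Chars.rstrip, List.dropWhile_eq_nil_iff]

lemma pvStrip_lstrip (l : List Char) :
    PySem.Chars.strip (PySem.Chars.lstrip l) = PySem.Chars.strip l := by
  simp [PySem.Chars.strip, PySem.Chars.lstrip, List.dropWhile_idempotent]

lemma pvRstrip_prefix (l : List Char) : PySem.Chars.rstrip l <+: l := by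
  rw [PySem.Chars.rstrip]
  exact List.reverse_suffix.mp
    (by simpa using List.dropWhile_suffix (l := l.reverse) PySem.Chars.isspace)

lemma pvDropWhile_all (p : Char → Bool) (l : List Char) (h : ∀ x ∈ l.dropWhile p, p x) :
    l.dropWhile p = [] := by
  cases hd : l.dropWhile p with
  | nil => rfl
  | cons x xs =>
    have h1 := List.head_dropWhile_not p (l := l) (by rw [hd]; simp)
    have h2 := h ((l.dropWhile p).head (by rw [hd]; simp)) (List.head_mem _)
    rw [h1] at h2; exact absurd h2 (by simp)

lemma pvStripChars_eq_nil_iff (s chars : List Char) :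
    PySem.Chars.stripChars s chars = [] ↔ ∀ c ∈ s, chars.contains c = true := by
  simp only [PySem.Chars.stripChars, List.reverse_eq_nil_iff]
  constructor
  · intro h c hc
    have h1 : (List.dropWhile (fun c => chars.contains c) s).reverse.dropWhile (fun c => chars.contains c) = [] := h
    have h2 : ∀ x ∈ (List.dropWhile (fun c => chars.contains c) s).reverse, chars.contains x = true :=
      List.dropWhile_eq_nil_iff.mp h1
    have h3 : List.dropWhile (fun c => chars.contains c) s = [] :=
      pvDropWhile_all _ _ (fun x hx => h2 x (List.mem_reverse.mpr hx))
    exact List.dropWhile_eq_nil_iff.mp h3 c hc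
  · intro h
    have h3 : List.dropWhile (fun c => chars.contains c) s = [] :=
      List.dropWhile_eq_nil_iff.mpr h
    rw [h3]
    simp

lemma pvAllHash_iff (t : List Char) :
    PySem.Set.equal (PySem.Set.ofList t) (PySem.Set.ofList ['#']) = true ↔ (t ≠ [] ∧ ∀ c ∈ t, c = '#') := by
  rw [PySem.Set.equal_iff]
  constructor
  · intro h
    refine ⟨?_, ?_⟩
    · intro ht
      subst ht
      have := (h '#').mpr (by simp [PySem.Set.mem_ofList])
      simp at this
    · intro c hc
      have := (h c).mp (by simp [PySem.Set.mem_ofList, hc])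
      simpa [PySem.Set.mem_ofList] using this
  · rintro ⟨hne, hall⟩ x
    simp only [PySem.Set.mem_ofList, List.mem_singleton]
    constructor
    · exact fun hx => hall x hx
    · rintro rfl
      cases t with
      | nil => exact absurd rfl hne
      | cons a as => have := hall a (by simp); rw [← this]; simp

lemma pvBlankChars (s : String) : (PySem.Str.strip s).toList = PySem.Chars.strip s.toList := by
  simp

lemma pvHash_eq (line : String) :
    (PySem.Str.startswith (PySem.Str.lstrip line) "#" &&
      PySem.Set.equal (PySem.Set.ofList (PySem.Str.strip (PySem.Str.lstrip line)).toList) (PySem.Set.ofList ['#']))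
    = (!(PySem.Str.strip line).toList.isEmpty &&
        (PySem.Str.stripChars (PySem.Str.strip line) "#").toList.isEmpty) := by
  rw [Bool.eq_iff_iff]
  simp only [Bool.and_eq_true, Bool.not_eq_true', List.isEmpty_iff, List.isEmpty_eq_false_iff,
    PySem.Str.startswith_eq, PySem.Str.toList_strip, PySem.Str.toList_lstrip, PySem.Str.toList_stripChars]
  rw [pvStrip_lstrip, pvAllHash_iff, pvStripChars_eq_nil_iff]
  show _ ↔ _ ∧ ∀ c ∈ _, ['#'].contains c = true
  constructor
  · rintro ⟨-, hne, hall⟩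
    exact ⟨hne, fun c hc => by simp [hall c hc]⟩
  · rintro ⟨hne, hall⟩
    have hall' : ∀ c ∈ PySem.Chars.strip line.toList, c = '#' := by
      intro c hc; have := hall c hc; simpa using this
    refine ⟨?_, hne, hall'⟩
    rw [show ("#".toList) = ['#'] from rfl]
    have hpre : PySem.Chars.strip line.toList <+: PySem.Chars.lstrip line.toList := by
      rw [PySem.Chars.strip]; exact pvRstrip_prefix _
    rw [PySem.Chars.startswith_iff]
    cases ht : PySem.Chars.strip line.toList with
    | nil => exact absurd ht hne
    | cons a as =>
      have ha : a = '#' := hall' a (by rw [ht]; simp)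
      rw [ht] at hpre
      exact List.IsPrefix.trans (by rw [ha]; exact ⟨as, rfl⟩) hpre

lemma pvDef_not_blank (line : String)
    (h : (PySem.Str.startswith (PySem.Str.lstrip line) "def " ||
          PySem.Str.startswith (PySem.Str.lstrip line) "class ") = true) :
    pvBlank line = false := by
  unfold pvBlank
  rw [List.isEmpty_eq_false_iff, pvBlankChars]
  intro hnil
  have hsp : ∀ c ∈ PySem.Chars.lstrip line.toList, PySem.Chars.isspace c := by
    rw [PySem.Chars.strip] at hnil
    exact (pvRstrip_eq_nil_iff _).mp hnil
  simp only [Bool.or_eq_true, PySem.Str.startswith_eq, PySem.Str.toList_lstrip,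
    PySem.Chars.startswith_iff] at h
  rcases h with h | h
  · have : 'd' ∈ PySem.Chars.lstrip line.toList := h.subset (by rw [show "def ".toList = ['d','e','f',' '] from rfl]; simp)
    have := hsp _ this
    simp [PySem.Chars.isspace] at this
  · have : 'c' ∈ PySem.Chars.lstrip line.toList := h.subset (by rw [show "class ".toList = ['c','l','a','s','s',' '] from rfl]; simp)
    have := hsp _ this
    simp [PySem.Chars.isspace] at this

lemma pvPop_eq (out pending : List String) (h : pvInv out pending) :
    pvPopBlanks (out ++ pending) = out := by
  obtain ⟨hp, hout⟩ := h
  unfold pvPopBlanks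
  rw [List.reverse_append, List.dropWhile_append,
    List.dropWhile_eq_nil_iff.mpr (fun x hx => hp x (List.mem_reverse.mp hx))]
  simp only [List.isEmpty_nil, if_true]
  rcases hout with rfl | ⟨hne, hlast⟩
  · simp
  · obtain ⟨ys, x, rfl⟩ := (List.eq_nil_or_concat out).resolve_left hne
    have hx : pvBlank x = false := by
      simpa using hlast
    rw [List.concat_eq_append, List.reverse_append]
    simp [hx]

lemma pvStep_eq (line : String) (out pending : List String) (h : pvInv out pending) :
    pvStepA (out ++ pending) line = (pvStepB (out, pending) line).1 ++ (pvStepB (out, pending) line).2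
    ∧ pvInv (pvStepB (out, pending) line).1 (pvStepB (out, pending) line).2 := by
  simp only [pvStepA, pvStepB]
  rw [pvHash_eq line]
  by_cases hh : (!(PySem.Str.strip line).toList.isEmpty &&
      (PySem.Str.stripChars (PySem.Str.strip line) "#").toList.isEmpty) = true
  · simp only [hh, if_true]
    exact ⟨trivial, h⟩
  · simp only [Bool.not_eq_true] at hh
    by_cases hd : (PySem.Str.startswith (PySem.Str.lstrip line) "def " ||
        PySem.Str.startswith (PySem.Str.lstrip line) "class ") = true
    · simp only [hh, hd, Bool.false_eq_true, if_false, if_true]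
      have hne : out ++ ["", pvHashes88, "", "", line] ≠ [] := by simp
      have hlast : (out ++ ["", pvHashes88, "", "", line]).getLast hne = line := by
        rw [List.getLast_append_of_ne_nil hne (List.cons_ne_nil _ _)]
        rfl
      refine ⟨by rw [pvPop_eq _ _ h]; simp, ⟨by simp, Or.inr ⟨hne, ?_⟩⟩⟩
      rw [hlast]
      exact pvDef_not_blank line hd
    · by_cases hb : (PySem.Str.strip line).toList.isEmpty = true
      · simp only [hd, hb, Bool.false_eq_true, if_false, if_true]
        refine ⟨by simp, ⟨?_, h.2⟩⟩
        intro p hp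
        rcases List.mem_append.mp hp with h1 | h1
        · exact h.1 p h1
        · rw [List.mem_singleton.mp h1]; exact hb
      · have hb' : PySem.Chars.strip line.toList ≠ [] := by
          intro h0
          apply hb
          rw [pvBlankChars, List.isEmpty_iff]
          exact h0
        have hsc : ¬ PySem.Chars.stripChars (PySem.Chars.strip line.toList) ['#'] = [] := by
          intro hc
          rw [Bool.eq_false_iff] at hh
          apply hh
          rw [Bool.and_eq_true]
          refine ⟨?_, ?_⟩
          · rw [Bool.not_eq_true', List.isEmpty_eq_false_iff, pvBlankChars]
            exact hb'
          · rw [List.isEmpty_iff, PySem.Str.toList_stripChars, pvBlankChars,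
              show ("#".toList) = ['#'] from rfl]
            exact hc
        have hy : (PySem.Str.stripChars (PySem.Str.strip line) "#").toList.isEmpty = false := by
          rw [List.isEmpty_eq_false_iff, PySem.Str.toList_stripChars, pvBlankChars,
            show ("#".toList) = ['#'] from rfl]
          exact hsc
        simp only [hd, hb, hy, Bool.not_false, Bool.and_false,
          Bool.false_eq_true, if_false]
        have hne : out ++ pending ++ [line] ≠ [] :=
          List.append_ne_nil_of_right_ne_nil _ (List.cons_ne_nil _ _)
        have hlast : (out ++ pending ++ [line]).getLast hne = line := by
          rw [List.getLast_append_of_ne_nil hne (List.cons_ne_nil _ _)]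
          rfl
        refine ⟨by simp, ⟨by simp, Or.inr ⟨hne, ?_⟩⟩⟩
        rw [hlast]
        rw [pvBlank, Bool.eq_false_iff]
        intro h0
        exact hb' (by rw [pvBlankChars] at h0; exact List.isEmpty_iff.mp h0)

lemma pvLoop_eq (lines : List String) : ∀ out pending, pvInv out pending →
    lines.foldl pvStepA (out ++ pending)
      = (lines.foldl pvStepB (out, pending)).1 ++ (lines.foldl pvStepB (out, pending)).2
    ∧ pvInv (lines.foldl pvStepB (out, pending)).1 (lines.foldl pvStepB (out, pending)).2 := by
  induction lines with
  | nil => exact fun out pending h => ⟨rfl, h⟩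
  | cons line rest ih =>
    intro out pending h
    obtain ⟨he, hi⟩ := pvStep_eq line out pending h
    simp only [List.foldl_cons]
    rw [he]
    simpa using ih (pvStepB (out, pending) line).1 (pvStepB (out, pending) line).2 hi


-- ===== VERDICT (by name: the statement is the Claim_ definition above) =====
theorem normalize_hashes_and_functions_spec : Claim_equal_normalize_hashes_and_functions := by
  intro source _
  show _ = _
  unfold normalize_hashes_and_functions normalize_hashes_and_functions_alt
  have h := pvLoop_eq (PySem.Str.splitlines source) [] [] ⟨by simp, Or.inl rfl⟩
  simp only [List.nil_append] at h
  simp only [h.1]
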